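-- pv_equiv track=rewrite | github.com/ParkerZhang/SketchBook | anatomy/morse_code/cw.py | analyze_timing
-- ===== SOURCE A (Python) =====
-- def analyze_timing(tones, time_per_frame):
--     # Convert tone array into durations of tones and silences
--     durations = []
--     current_duration = 0
--     current_state = tones[0]
--
--     for tone in tones[1:]:
--         if tone == current_state:
--             current_duration += time_per_frame
--         else:
--             durations.append((current_state, current_duration))
--             current_duration = time_per_frame
--             current_state = tone
--     durations.append((current_state, current_duration))
--
--     return durations
-- ===== SOURCE B (Python) =====
-- def analyze_timing(tones, time_per_frame):
--     # Two-pointer run scan: find each maximal run's end, then emit its length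
--     # times time_per_frame; the first run is emitted separately, one frame
--     # shorter, matching the transition-counting convention of the original.
--     n = len(tones)
--
--     def run_end(i):
--         j = i
--         while j < n and tones[j] == tones[i]:
--             j += 1
--         return j
--
--     j = run_end(0)
--     durations = [(tones[0], (j - 1) * time_per_frame)]
--     i = j
--     while i < n:
--         j = run_end(i)
--         durations.append((tones[i], (j - i) * time_per_frame))
--         i = j
--     return durations
-- ===== Notes on version B (the rewrite author's own statement) =====
-- stated objective: alternative
-- what changed: Replaced the single-pass current_state/current_duration accumulator with a two-pointer run scan that finds each maximal run's end index and emits its length times time_per_frame at once (first run handled separately, one frame shorter as in A).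
import Mathlib
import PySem

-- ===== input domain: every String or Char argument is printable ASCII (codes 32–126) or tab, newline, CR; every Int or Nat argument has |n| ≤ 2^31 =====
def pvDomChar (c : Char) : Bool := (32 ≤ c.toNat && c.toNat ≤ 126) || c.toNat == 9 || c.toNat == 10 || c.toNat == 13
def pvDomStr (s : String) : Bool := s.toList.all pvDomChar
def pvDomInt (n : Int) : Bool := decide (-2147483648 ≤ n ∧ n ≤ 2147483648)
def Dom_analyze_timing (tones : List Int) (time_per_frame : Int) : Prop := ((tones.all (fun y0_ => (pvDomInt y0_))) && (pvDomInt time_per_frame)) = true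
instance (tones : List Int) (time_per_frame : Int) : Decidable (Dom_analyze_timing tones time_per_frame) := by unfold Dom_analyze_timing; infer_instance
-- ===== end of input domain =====

-- B replaces A's running current_state/current_duration accumulator with a two-pointer
-- run scan (length of each maximal run, multiplied by time_per_frame); same O(n) cost.


-- ===== PORT A =====
-- A's loop body: one step of the fold over tones[1:] with state (durations, current_duration, current_state)
def pvStepA (tpf : Int) (acc : List (Int × Int) × Int × Int) (tone : Int) : List (Int × Int) × Int × Int :=
  if tone == acc.2.2 then (acc.1, acc.2.1 + tpf, acc.2.2)
  else (acc.1 ++ [(acc.2.2, acc.2.1)], tpf, tone)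

def analyze_timing (tones : List Int) (time_per_frame : Int) : List (Int × Int) :=
  match tones with
  | [] => []  -- tones[0] raises IndexError in Python; excluded by Pre_
  | t0 :: rest =>
    let s := rest.foldl (pvStepA time_per_frame) ([], 0, t0)
    s.1 ++ [(s.2.2, s.2.1)]

-- ===== PORT B =====
-- run_end(i) - i, expressed on the suffix: length of the maximal leading run equal to v
def pvRunLen (v : Int) : List Int → Nat
  | [] => 0
  | x :: xs => if x == v then pvRunLen v xs + 1 else 0

theorem pvRunLen_lt (x : Int) (xs : List Int) :
    (((x :: xs).drop (pvRunLen x (x :: xs))).length) < (x :: xs).length := by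
  simp only [pvRunLen, BEq.rfl, if_true, List.drop_succ_cons, List.length_cons, List.length_drop]
  omega

-- the second while loop of B: emit (head, runlen*tpf) for each remaining maximal run
def pvAltLoop : List Int → Int → List (Int × Int)
  | [], _ => []
  | x :: xs, tpf =>
    (x, (pvRunLen x (x :: xs) : Int) * tpf) :: pvAltLoop ((x :: xs).drop (pvRunLen x (x :: xs))) tpf
termination_by ts _ => ts.length
decreasing_by exact pvRunLen_lt x xs

def analyze_timing_alt (tones : List Int) (time_per_frame : Int) : List (Int × Int) :=
  match tones with
  | [] => []  -- tones[0] raises IndexError in Python; excluded by Pre_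
  | x :: xs =>
    (x, ((pvRunLen x (x :: xs) : Int) - 1) * time_per_frame) ::
      pvAltLoop ((x :: xs).drop (pvRunLen x (x :: xs))) time_per_frame

-- ===== PRECONDITION & SPEC =====
-- Both programs raise IndexError (tones[0]) on the empty list; Pre_ excludes exactly that.
def Pre_analyze_timing (tones : List Int) (time_per_frame : Int) : Prop := tones ≠ []
instance (tones : List Int) (time_per_frame : Int) : Decidable (Pre_analyze_timing tones time_per_frame) := by unfold Pre_analyze_timing; infer_instance
def pvWitness_analyze_timing : List Int × Int := ([1, 1, 0, 0, 0, 1], 2)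

def Spec_analyze_timing (tones : List Int) (time_per_frame : Int) (out : List (Int × Int)) : Prop := out = analyze_timing_alt tones time_per_frame
instance (tones : List Int) (time_per_frame : Int) (out : List (Int × Int)) : Decidable (Spec_analyze_timing tones time_per_frame out) := by unfold Spec_analyze_timing; infer_instance

-- ===== CLAIM (what is proved, stated in full; the proofs are below) =====
def Claim_equal_analyze_timing : Prop := ∀ (tones : List Int) (time_per_frame : Int), Dom_analyze_timing tones time_per_frame → Pre_analyze_timing tones time_per_frame → Spec_analyze_timing tones time_per_frame (analyze_timing tones time_per_frame)

-- ===== LEMMAS AND PROOFS =====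

-- A's fold only ever appends to the durations list: the accumulated prefix factors out.
theorem foldA_prefix (tpf : Int) (rest : List Int) (ds : List (Int × Int)) (cd cs : Int) :
    rest.foldl (pvStepA tpf) (ds, cd, cs) =
      (ds ++ (rest.foldl (pvStepA tpf) ([], cd, cs)).1,
       (rest.foldl (pvStepA tpf) ([], cd, cs)).2) := by
  induction rest generalizing ds cd cs with
  | nil => simp
  | cons x xs ih =>
    simp only [List.foldl_cons, pvStepA, List.nil_append]
    by_cases h : x == cs
    · simp only [h, if_true]
      exact ih ds (cd + tpf) cs
    · simp only [h, Bool.false_eq_true, if_false]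
      rw [ih (ds ++ [(cs, cd)]) tpf x, ih [(cs, cd)] tpf x]
      simp

-- Characterisation of A's remaining computation in terms of B's run scan.
theorem foldA_runs (tpf : Int) (rest : List Int) (cd cs : Int) :
    (rest.foldl (pvStepA tpf) ([], cd, cs)).1 ++
        [((rest.foldl (pvStepA tpf) ([], cd, cs)).2.2,
          (rest.foldl (pvStepA tpf) ([], cd, cs)).2.1)] =
      (cs, cd + (pvRunLen cs rest : Int) * tpf) ::
        pvAltLoop (rest.drop (pvRunLen cs rest)) tpf := by
  induction rest generalizing cd cs with
  | nil => simp [pvRunLen, pvAltLoop]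
  | cons x xs ih =>
    simp only [List.foldl_cons, pvStepA, List.nil_append]
    by_cases h : x == cs
    · have hx : x = cs := by simpa using h
      subst hx
      simp only [h, if_true]
      rw [ih (cd + tpf) x]
      simp only [pvRunLen, BEq.rfl, if_true, List.drop_succ_cons]
      congr 2
      push_cast
      ring
    · simp only [h, Bool.false_eq_true, if_false]
      rw [foldA_prefix tpf xs [(cs, cd)] tpf x]
      simp only [List.cons_append, List.nil_append]
      rw [ih tpf x]
      have hrl : pvRunLen cs (x :: xs) = 0 := by
        simp [pvRunLen, h]
      rw [hrl]
      simp only [List.drop_zero, Nat.cast_zero, zero_mul, add_zero]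
      rw [pvAltLoop]
      simp only [pvRunLen, BEq.rfl, if_true, List.drop_succ_cons]
      congr 2
      push_cast
      ring

-- ===== VERDICT (by name: the statement is the Claim_ definition above) =====
theorem analyze_timing_spec : Claim_equal_analyze_timing := by
  intro tones tpf _ hpre
  unfold Spec_analyze_timing
  cases tones with
  | nil => exact absurd rfl hpre
  | cons t0 rest =>
    simp only [analyze_timing, analyze_timing_alt]
    rw [foldA_runs tpf rest 0 t0]
    simp only [pvRunLen, BEq.rfl, if_true, List.drop_succ_cons]
    congr 2
    push_cast
    ring
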